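-- pv_equiv track=rewrite | github.com/sprax/python | iq/sub_one_rep.py | num_repeat_1_subs_counter
-- ===== SOURCE A (Python) =====
-- from collections import Counter
--
-- def num_repeat_1_subs_counter(string, sublen):
--     '''returns the number of substrings of string, of length sublen,
--     that contain exactly one repeated character.
--     '''
--     totlen = len(string)
--     if sublen > totlen:
--         return 0
--
--     # Initialize container representing the sliding window
--     counter = Counter(string[0:sublen])
--     sublen_m1 = sublen - 1
--     result = 0
--
--     for k in range(len(string) - sublen):
--         if len(counter) == sublen_m1:
--             result += 1
--         char = string[k]
--         if counter.get(char) == 1: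
--             counter.pop(char)
--         else:
--             counter.subtract(char)
--         counter.update(string[k + sublen])
--
--     # Check the last window position after the loop ends
--     if len(counter) == sublen_m1:
--         result += 1
--     return result
-- ===== SOURCE B (Python) =====
-- def num_repeat_1_subs_counter(string, sublen):
--     '''returns the number of substrings of string, of length sublen,
--     that contain exactly one repeated character.
--     '''
--     return sum(1 for i in range(len(string) - sublen + 1)
--                if len(set(string[i:i + sublen])) == sublen - 1)
-- ===== Notes on version B (the rewrite author's own statement) =====
-- stated objective: simpler
-- what changed: A maintains a sliding Counter with pop/subtract/update across the string; B drops the incremental state entirely and counts, in one comprehension, the windows whose number of distinct characters (len(set(window))) equals sublen-1.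
import Mathlib
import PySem

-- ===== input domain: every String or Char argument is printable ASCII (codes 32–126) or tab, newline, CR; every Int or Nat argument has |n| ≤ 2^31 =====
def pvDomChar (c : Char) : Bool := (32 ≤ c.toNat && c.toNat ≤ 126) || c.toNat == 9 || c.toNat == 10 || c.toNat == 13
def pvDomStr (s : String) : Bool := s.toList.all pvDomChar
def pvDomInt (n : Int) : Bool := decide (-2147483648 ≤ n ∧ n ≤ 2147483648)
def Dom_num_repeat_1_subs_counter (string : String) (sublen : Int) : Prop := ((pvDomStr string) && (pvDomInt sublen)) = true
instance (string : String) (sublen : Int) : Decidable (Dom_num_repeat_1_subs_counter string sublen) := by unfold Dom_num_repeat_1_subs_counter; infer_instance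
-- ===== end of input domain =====

-- B replaces A's incrementally-maintained sliding Counter by recomputing each window's
-- distinct-character count independently (simpler: one comprehension, no mutable counter).


-- ===== PORT A =====
-- literal transliteration of A: slide a Counter over the string, popping the char that
-- leaves the window and adding the one that enters; count windows with len(counter) == sublen-1
def num_repeat_1_subs_counter (string : String) (sublen : Int) : Int :=
  let s := string.toList
  let totlen : Int := (s.length : Int)
  if sublen > totlen then 0
  else
    let counter0 := PySem.Dict.counter (PySem.List.slice s (some 0) (some sublen))
    let sublen_m1 := sublen - 1
    let st := (PySem.List.pyRange 0 ((s.length : Int) - sublen) 1).foldl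
      (fun (st : PySem.Dict Char Int × Int) k =>
        let result := if (st.1.size : Int) = sublen_m1 then st.2 + 1 else st.2
        let char := (PySem.List.pyGet? s k).getD ' '   -- index is in range whenever Python returns (Pre_); ' ' is a dead default
        let c := if st.1.get? char = some 1 then st.1.erase char
                 else st.1.modify char 0 (· - 1)       -- Counter.subtract
        let c := c.modify ((PySem.List.pyGet? s (k + sublen)).getD ' ') 0 (· + 1)  -- Counter.update
        (c, result)) (counter0, 0)
    if (st.1.size : Int) = sublen_m1 then st.2 + 1 else st.2

-- ===== PORT B =====
-- literal transliteration of B: sum over all window starts of an indicator computed from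
-- the window's set of distinct characters
def num_repeat_1_subs_counter_alt (string : String) (sublen : Int) : Int :=
  let s := string.toList
  ((PySem.List.pyRange 0 ((s.length : Int) - sublen + 1) 1).map (fun i =>
      if ((PySem.Set.ofList (PySem.List.slice s (some i) (some (i + sublen)))).length : Int)
          = sublen - 1 then (1 : Int) else 0)).sum

-- ===== PRECONDITION & SPEC =====
-- Pre_ excludes negative sublen, on which Python A always raises IndexError (the loop
-- over-runs the string); A returns normally on every sublen ≥ 0.
def Pre_num_repeat_1_subs_counter (string : String) (sublen : Int) : Prop := 0 ≤ sublen
instance (string : String) (sublen : Int) : Decidable (Pre_num_repeat_1_subs_counter string sublen) := by unfold Pre_num_repeat_1_subs_counter; infer_instance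
def pvWitness_num_repeat_1_subs_counter : String × Int := ("aabcb", 3)

def Spec_num_repeat_1_subs_counter (string : String) (sublen : Int) (out : Int) : Prop := out = num_repeat_1_subs_counter_alt string sublen
instance (string : String) (sublen : Int) (out : Int) : Decidable (Spec_num_repeat_1_subs_counter string sublen out) := by unfold Spec_num_repeat_1_subs_counter; infer_instance

-- ===== CLAIM (what is proved, stated in full; the proofs are below) =====
def Claim_equal_num_repeat_1_subs_counter : Prop := ∀ (string : String) (sublen : Int), Dom_num_repeat_1_subs_counter string sublen → Pre_num_repeat_1_subs_counter string sublen → Spec_num_repeat_1_subs_counter string sublen (num_repeat_1_subs_counter string sublen)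

-- ===== LEMMAS AND PROOFS =====

-- The window of length n starting at i
def pvWin (s : List Char) (n i : Nat) : List Char := (s.drop i).take n

-- B's per-window indicator
def pvInd (s : List Char) (n i : Nat) : Int :=
  if ((PySem.Set.ofList (pvWin s n i)).length : Int) = (n : Int) - 1 then 1 else 0

-- A's loop body (definitionally the lambda in the port, lets zeta-reduced)
def pvStepI (s : List Char) (sublen : Int) (st : PySem.Dict Char Int × Int) (k : Int) :
    PySem.Dict Char Int × Int :=
  ((if st.1.get? ((PySem.List.pyGet? s k).getD ' ') = some 1 then
      st.1.erase ((PySem.List.pyGet? s k).getD ' ')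
    else st.1.modify ((PySem.List.pyGet? s k).getD ' ') 0 (· - 1)).modify
      ((PySem.List.pyGet? s (k + sublen)).getD ' ') 0 (· + 1),
   if (st.1.size : Int) = sublen - 1 then st.2 + 1 else st.2)

theorem pv_A_eq (string : String) (sublen : Int) :
    num_repeat_1_subs_counter string sublen =
    (if sublen > (string.toList.length : Int) then 0
     else
       if ((((PySem.List.pyRange 0 ((string.toList.length : Int) - sublen) 1).foldl
              (pvStepI string.toList sublen)
              (PySem.Dict.counter (PySem.List.slice string.toList (some 0) (some sublen)),
                0)).1.size : Int)) = sublen - 1 then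
         ((PySem.List.pyRange 0 ((string.toList.length : Int) - sublen) 1).foldl
            (pvStepI string.toList sublen)
            (PySem.Dict.counter (PySem.List.slice string.toList (some 0) (some sublen)), 0)).2 + 1
       else
         ((PySem.List.pyRange 0 ((string.toList.length : Int) - sublen) 1).foldl
            (pvStepI string.toList sublen)
            (PySem.Dict.counter (PySem.List.slice string.toList (some 0) (some sublen)), 0)).2) := rfl

theorem pv_B_eq (string : String) (sublen : Int) :
    num_repeat_1_subs_counter_alt string sublen =
    ((PySem.List.pyRange 0 ((string.toList.length : Int) - sublen + 1) 1).map (fun i =>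
        if ((PySem.Set.ofList (PySem.List.slice string.toList (some i) (some (i + sublen)))).length : Int)
            = sublen - 1 then (1 : Int) else 0)).sum := rfl

-- Abstraction relating A's Counter dict to the multiset of the current window
def pvRepr (c : PySem.Dict Char Int) (w : List Char) : Prop :=
  c.keys.Nodup ∧ (∀ ch, c.getD ch 0 = (w.count ch : Int)) ∧ (∀ ch, ch ∈ c.keys ↔ ch ∈ w)

-- ---- erase lemmas (PySem.Dict.erase = items.filter; the prelude has no erase lemmas) ----
theorem pv_get?_erase_self {κ ν : Type} [BEq κ] [LawfulBEq κ] (d : PySem.Dict κ ν) (k : κ) :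
    (d.erase k).get? k = none := by
  simp [PySem.Dict.erase, PySem.Dict.get?, List.find?_eq_none]

theorem pv_find?_filter_ne {κ ν : Type} [BEq κ] [LawfulBEq κ] (t : List (κ × ν)) (k k' : κ)
    (h : k' ≠ k) : List.find? (fun p => p.1 == k') (List.filter (fun p => !p.1 == k) t)
      = List.find? (fun p => p.1 == k') t := by
  induction t with
  | nil => rfl
  | cons p t ih =>
    by_cases hk : p.1 = k
    · rw [List.filter_cons_of_neg (by simpa using hk), ih]
      have hk' : ¬ (p.1 == k') = true := by simp [hk, Ne.symm h]
      simp only [List.find?_cons, Bool.not_eq_true] at *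
      rw [hk']
    · rw [List.filter_cons_of_pos (by simpa using hk)]
      by_cases hkk : (p.1 == k') = true
      · simp only [List.find?_cons]
        rw [hkk]
      · simp only [List.find?_cons, Bool.not_eq_true] at *
        rw [hkk, ih]

theorem pv_get?_erase_of_ne {κ ν : Type} [BEq κ] [LawfulBEq κ] (d : PySem.Dict κ ν) (k k' : κ)
    (h : k' ≠ k) : (d.erase k).get? k' = d.get? k' := by
  simp only [PySem.Dict.erase, PySem.Dict.get?]
  rw [pv_find?_filter_ne d.items k k' h]

theorem pv_mem_keys_erase {κ ν : Type} [BEq κ] [LawfulBEq κ] (d : PySem.Dict κ ν) (k k' : κ) :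
    k' ∈ (d.erase k).keys ↔ k' ∈ d.keys ∧ k' ≠ k := by
  simp only [PySem.Dict.erase, PySem.Dict.keys, List.mem_map, List.mem_filter]
  constructor
  · rintro ⟨p, ⟨hp, hne⟩, rfl⟩
    simp at hne
    exact ⟨⟨p, hp, rfl⟩, hne⟩
  · rintro ⟨⟨p, hp, rfl⟩, hne⟩
    exact ⟨p, ⟨hp, by simpa using hne⟩, rfl⟩

theorem pv_nodup_keys_erase {κ ν : Type} [BEq κ] [LawfulBEq κ] (d : PySem.Dict κ ν) (k : κ)
    (h : d.keys.Nodup) : (d.erase k).keys.Nodup := by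
  simp only [PySem.Dict.erase, PySem.Dict.keys] at *
  exact (List.Sublist.map _ (List.filter_sublist (l := d.items))).nodup h

-- ---- the dict abstraction ----
theorem pv_repr_size (c : PySem.Dict Char Int) (w : List Char) (h : pvRepr c w) :
    c.size = (PySem.Set.ofList w).length := by
  obtain ⟨hnd, -, hmem⟩ := h
  have hperm : c.keys.Perm (PySem.Set.ofList w) := by
    apply List.perm_of_nodup_nodup_toFinset_eq hnd (PySem.Set.nodup_ofList w)
    ext ch
    simp [List.mem_toFinset, hmem, PySem.Set.mem_ofList]
  have : c.keys.length = (PySem.Set.ofList w).length := hperm.length_eq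
  simpa [PySem.Dict.size, PySem.Dict.keys] using this

theorem pv_repr_counter (w : List Char) : pvRepr (PySem.Dict.counter w) w := by
  refine ⟨PySem.Dict.nodup_keys_counter w, fun ch => PySem.Dict.getD_counter w ch, fun ch => ?_⟩
  rw [PySem.Dict.keys_counter]
  exact PySem.Set.mem_ofList w ch

theorem pv_repr_add (c : PySem.Dict Char Int) (b : Char) (w : List Char) (h : pvRepr c w) :
    pvRepr (c.modify b 0 (· + 1)) (w ++ [b]) := by
  obtain ⟨hnd, hcnt, hmem⟩ := h
  refine ⟨?_, fun ch => ?_, fun ch => ?_⟩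
  · rw [PySem.Dict.keys_modify]
    exact PySem.Dict.nodup_keys_insert _ _ _ hnd
  · rw [PySem.Dict.getD_modify]
    by_cases hch : ch = b
    · subst hch; rw [if_pos rfl, hcnt]
      simp [List.count_append]
    · rw [if_neg hch, hcnt]
      simp [List.count_append, Ne.symm hch]
  · rw [PySem.Dict.keys_modify, PySem.Dict.mem_keys_insert, hmem]
    simp [List.mem_append]
    tauto

theorem pv_repr_remove (c : PySem.Dict Char Int) (a : Char) (w : List Char)
    (h : pvRepr c (a :: w)) :
    pvRepr (if c.get? a = some 1 then c.erase a else c.modify a 0 (· - 1)) w := by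
  obtain ⟨hnd, hcnt, hmem⟩ := h
  by_cases hpos : c.get? a = some 1
  · rw [if_pos hpos]
    have hga : c.getD a 0 = 1 := by rw [PySem.Dict.getD_eq_get?_getD, hpos]; rfl
    have hwa : w.count a = 0 := by
      have := hcnt a; rw [hga] at this
      have : (a :: w).count a = 1 := by exact_mod_cast this.symm
      simpa [List.count_cons_self] using this
    have hnw : a ∉ w := List.count_eq_zero.mp hwa
    refine ⟨pv_nodup_keys_erase c a hnd, fun ch => ?_, fun ch => ?_⟩
    · by_cases hch : ch = a
      · subst hch
        rw [PySem.Dict.getD_eq_get?_getD, pv_get?_erase_self, hwa]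
        rfl
      · rw [PySem.Dict.getD_eq_get?_getD, pv_get?_erase_of_ne c a ch hch,
          ← PySem.Dict.getD_eq_get?_getD, hcnt]
        simp [List.count_cons, Ne.symm hch]
    · rw [pv_mem_keys_erase, hmem]
      constructor
      · rintro ⟨hin, hne⟩
        simpa [List.mem_cons, hne] using hin
      · intro hw
        exact ⟨List.mem_cons_of_mem _ hw, fun he => hnw (he ▸ hw)⟩
  · rw [if_neg hpos]
    have hga : c.getD a 0 = ((a :: w).count a : Int) := hcnt a
    have hpos' : 0 < (a :: w).count a := List.count_pos_iff.mpr (List.mem_cons_self)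
    have hne1 : (a :: w).count a ≠ 1 := by
      intro h1
      apply hpos
      have hg : c.getD a 0 = 1 := by rw [hga, h1]; rfl
      rw [PySem.Dict.getD_eq_get?_getD] at hg
      cases hg' : c.get? a with
      | none => rw [hg'] at hg; simp at hg
      | some v => rw [hg'] at hg
                  simp at hg
                  rw [hg]
    have haw : a ∈ w := by
      have h2 : 2 ≤ (a :: w).count a := by omega
      rw [List.count_cons_self] at h2
      exact List.count_pos_iff.mp (by omega)
    refine ⟨?_, fun ch => ?_, fun ch => ?_⟩
    · rw [PySem.Dict.keys_modify]
      exact PySem.Dict.nodup_keys_insert _ _ _ hnd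
    · rw [PySem.Dict.getD_modify]
      by_cases hch : ch = a
      · subst hch; rw [if_pos rfl, hcnt]
        rw [List.count_cons_self]
        push_cast
        ring
      · rw [if_neg hch, hcnt]
        simp [List.count_cons, Ne.symm hch]
    · rw [PySem.Dict.keys_modify, PySem.Dict.mem_keys_insert, hmem]
      constructor
      · rintro (rfl | hin)
        · exact haw
        · rcases List.mem_cons.mp hin with rfl | hw
          · exact haw
          · exact hw
      · intro hw; exact Or.inr (List.mem_cons_of_mem _ hw)

-- ---- window algebra ----
theorem pv_win_cons (s : List Char) (n m : Nat) (hn : 1 ≤ n) (hm : m < s.length) :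
    pvWin s n m = s[m] :: (s.drop (m + 1)).take (n - 1) := by
  unfold pvWin
  obtain ⟨q, rfl⟩ : ∃ q, n = q + 1 := ⟨n - 1, by omega⟩
  rw [List.drop_eq_getElem_cons hm, List.take_succ_cons]
  simp

theorem pv_win_snoc (s : List Char) (n m : Nat) (hn : 1 ≤ n) (hmn : m + n < s.length) :
    pvWin s n (m + 1) = (s.drop (m + 1)).take (n - 1) ++ [s[m + n]] := by
  unfold pvWin
  obtain ⟨q, rfl⟩ : ∃ q, n = q + 1 := ⟨n - 1, by omega⟩
  have hq : q < (s.drop (m + 1)).length := by rw [List.length_drop]; omega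
  rw [List.take_add_one, List.getElem?_eq_getElem hq]
  simp only [Option.toList_some, Nat.add_sub_cancel]
  congr 1
  rw [List.getElem_drop]
  have hidx : m + 1 + q = m + (q + 1) := by omega
  simp only [hidx]

-- ---- the main loop invariant ----
theorem pv_loop (s : List Char) (n : Nat) (hn : 1 ≤ n) (hL : n ≤ s.length) :
    ∀ m, m ≤ s.length - n →
    pvRepr ((((List.range m).map (fun (k : Nat) => (k : Int))).foldl (pvStepI s (n : Int))
        (PySem.Dict.counter (pvWin s n 0), 0)).1) (pvWin s n m) ∧
    ((((List.range m).map (fun (k : Nat) => (k : Int))).foldl (pvStepI s (n : Int))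
        (PySem.Dict.counter (pvWin s n 0), 0)).2)
      = ((List.range m).map (fun i => pvInd s n i)).sum := by
  intro m
  induction m with
  | zero => intro _; exact ⟨pv_repr_counter _, rfl⟩
  | succ m ih =>
    intro hm
    obtain ⟨ih1, ih2⟩ := ih (by omega)
    have hmL : m < s.length := by omega
    have hmnL : m + n < s.length := by omega
    rw [List.range_succ, List.map_append, List.foldl_append, List.map_append, List.sum_append]
    set st := (((List.range m).map (fun (k : Nat) => (k : Int))).foldl (pvStepI s (n : Int))
        (PySem.Dict.counter (pvWin s n 0), 0)) with hst
    simp only [List.map_cons, List.map_nil, List.foldl_cons, List.foldl_nil, List.sum_cons,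
      List.sum_nil]
    have hget1 : (PySem.List.pyGet? s ((m : Nat) : Int)).getD ' ' = s[m] := by
      rw [PySem.List.pyGet?_natCast, List.getElem?_eq_getElem hmL]
      rfl
    have hget2 : (PySem.List.pyGet? s (((m : Nat) : Int) + (n : Int))).getD ' ' = s[m + n] := by
      rw [show ((m : Nat) : Int) + (n : Int) = ((m + n : Nat) : Int) by push_cast; ring,
        PySem.List.pyGet?_natCast, List.getElem?_eq_getElem hmnL]
      rfl
    unfold pvStepI
    rw [hget1, hget2]
    constructor
    · have h1 : pvRepr (if st.1.get? s[m] = some 1 then st.1.erase s[m]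
          else st.1.modify s[m] 0 (· - 1)) ((s.drop (m + 1)).take (n - 1)) := by
        apply pv_repr_remove
        rw [← pv_win_cons s n m hn hmL]
        exact ih1
      have h2 := pv_repr_add _ s[m + n] _ h1
      rw [← pv_win_snoc s n m hn hmnL] at h2
      exact h2
    · rw [ih2]
      have hsz : (st.1.size : Int) = ((PySem.Set.ofList (pvWin s n m)).length : Int) := by
        rw [pv_repr_size st.1 _ ih1]
      rw [hsz]
      unfold pvInd
      split_ifs <;> ring

-- with sublen = 0 the increment condition (size = -1) is never true: snd is constant
theorem pv_loop_zero (s : List Char) (l : List Int) (st : PySem.Dict Char Int × Int) :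
    (l.foldl (pvStepI s ((0 : Nat) : Int)) st).2 = st.2 := by
  induction l generalizing st with
  | nil => rfl
  | cons k t ih =>
    rw [List.foldl_cons, ih]
    unfold pvStepI
    simp only []
    rw [if_neg (by omega)]

theorem pv_pyRange_nonpos (x : Int) (hx : x ≤ 0) : PySem.List.pyRange 0 x 1 = [] := by
  unfold PySem.List.pyRange
  rw [if_neg (by omega : ¬ (1 : Int) = 0)]
  simp only [show ¬ ((0 : Int) < x) by omega, if_pos (by omega : (0:Int) < 1), if_false]
  simp

-- ===== VERDICT (by name: the statement is the Claim_ definition above) =====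
theorem num_repeat_1_subs_counter_spec : Claim_equal_num_repeat_1_subs_counter := by
  intro string sublen _ hpre
  unfold Pre_num_repeat_1_subs_counter at hpre
  unfold Spec_num_repeat_1_subs_counter
  rw [pv_A_eq, pv_B_eq]
  set s := string.toList with hs
  by_cases hbig : sublen > (s.length : Int)
  · rw [if_pos hbig, pv_pyRange_nonpos _ (by omega)]
    rfl
  · rw [if_neg hbig]
    push_neg at hbig
    obtain ⟨n, rfl⟩ : ∃ n : Nat, sublen = (n : Int) := ⟨sublen.toNat, (Int.toNat_of_nonneg hpre).symm⟩
    have hnL : n ≤ s.length := by exact_mod_cast hbig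
    have hrange : PySem.List.pyRange 0 ((s.length : Int) - (n : Int)) 1
        = (List.range (s.length - n)).map (fun (k : Nat) => (k : Int)) := by
      rw [show (s.length : Int) - (n : Int) = ((s.length - n : Nat) : Int) by push_cast [hnL]; ring]
      exact PySem.List.pyRange_zero_natCast _
    have hrange1 : PySem.List.pyRange 0 ((s.length : Int) - (n : Int) + 1) 1
        = (List.range (s.length - n + 1)).map (fun (k : Nat) => (k : Int)) := by
      rw [show (s.length : Int) - (n : Int) + 1 = ((s.length - n + 1 : Nat) : Int) by
        push_cast [hnL]; ring]
      exact PySem.List.pyRange_zero_natCast _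
    have hslice : ∀ i : Nat, PySem.List.slice s (some ((i : Nat) : Int)) (some (((i : Nat) : Int) + (n : Int)))
        = pvWin s n i := by
      intro i
      rw [show ((i : Nat) : Int) + (n : Int) = ((i + n : Nat) : Int) by push_cast; ring,
        PySem.List.slice_natCast]
      unfold pvWin
      congr 1
      omega
    have hB : ((PySem.List.pyRange 0 ((s.length : Int) - (n : Int) + 1) 1).map (fun i =>
        if ((PySem.Set.ofList (PySem.List.slice s (some i) (some (i + (n : Int))))).length : Int)
            = (n : Int) - 1 then (1 : Int) else 0)).sum
        = ((List.range (s.length - n + 1)).map (fun i => pvInd s n i)).sum := by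
      rw [hrange1, List.map_map]
      congr 1
      apply List.map_congr_left
      intro i _
      simp only [Function.comp]
      rw [hslice i]
      rfl
    rw [hB]
    rcases Nat.eq_zero_or_pos n with hn0 | hn
    · subst hn0
      rw [pv_loop_zero]
      rw [if_neg (by omega)]
      rw [List.sum_eq_zero (by
        intro x hx
        rw [List.mem_map] at hx
        obtain ⟨i, hi, rfl⟩ := hx
        unfold pvInd
        rw [if_neg (by omega)])]
    · have h0 : PySem.List.slice s (some 0) (some (n : Int)) = pvWin s n 0 := by
        have := hslice 0
        simpa using this
      rw [hrange, h0]
      obtain ⟨hrep, hsnd⟩ := pv_loop s n hn hnL (s.length - n) le_rfl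
      set stf := (((List.range (s.length - n)).map (fun (k : Nat) => (k : Int))).foldl
          (pvStepI s (n : Int)) (PySem.Dict.counter (pvWin s n 0), 0)) with hstf
      rw [hsnd]
      have hsz : (stf.1.size : Int) = ((PySem.Set.ofList (pvWin s n (s.length - n))).length : Int) := by
        rw [pv_repr_size stf.1 _ hrep]
      rw [hsz, List.range_succ, List.map_append, List.sum_append]
      unfold pvInd
      simp only [List.map_cons, List.map_nil, List.sum_cons, List.sum_nil]
      split_ifs <;> ring
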